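-- pv_equiv track=rewrite | github.com/QV2000/aer-data-pipeline | transforms/silver.py | _classify_facility_class
-- ===== SOURCE A (Python) =====
-- def _classify_facility_class(text: str) -> str:
--     t = str(text or '').lower()
--     if not t:
--         return 'other'
--     if 'battery' in t:
--         if any(k in t for k in ['bitumen', 'sagd', 'thermal', 'oil sands']):
--             return 'bitumen_battery'
--         if any(k in t for k in ['gas', 'ngl']):
--             return 'gas_battery'
--         if any(k in t for k in ['oil', 'crude']):
--             return 'oil_battery'
--         return 'oil_battery'
--     if any(k in t for k in ['plant', 'fractionation', 'refinery', 'sulphur']):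
--         if 'gas' in t:
--             return 'gas_plant'
--         return 'plant'
--     if 'compressor' in t:
--         return 'compressor'
--     if any(k in t for k in ['gathering', 'meter', 'regulator']):
--         return 'gathering' if 'gathering' in t else 'meter'
--     if any(k in t for k in ['terminal', 'tank', 'storage']):
--         return 'terminal' if 'terminal' in t or 'tank' in t else 'storage'
--     if any(k in t for k in ['disposal', 'inject', 'injection', 'waste']):
--         return 'disposal'
--     if 'treat' in t:
--         return 'treating'
--     return 'other'
-- ===== SOURCE B (Python) =====
-- # Two-phase classifier: phase 1 extracts a SET of feature tags from the text via
-- # one scan of a flat keyword->tag table; phase 2 decides the label purely from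
-- # the tag set (no substring tests).  A's 'oil'/'crude' test is dead code
-- # (both arms return 'oil_battery') and has no keyword here.
-- _KEYWORD_TAGS = [
--     ('bitumen', 'therm'), ('sagd', 'therm'), ('thermal', 'therm'), ('oil sands', 'therm'),
--     ('battery', 'battery'),
--     ('gas', 'gas'), ('ngl', 'ngl'),
--     ('plant', 'plantish'), ('fractionation', 'plantish'), ('refinery', 'plantish'), ('sulphur', 'plantish'),
--     ('compressor', 'compressor'),
--     ('gathering', 'gathering'), ('meter', 'meterish'), ('regulator', 'meterish'),
--     ('terminal', 'terminalish'), ('tank', 'terminalish'), ('storage', 'storage'),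
--     ('disposal', 'disposalish'), ('inject', 'disposalish'), ('injection', 'disposalish'), ('waste', 'disposalish'),
--     ('treat', 'treat'),
-- ]
--
--
-- def _decide(tags):
--     if 'battery' in tags:
--         if 'therm' in tags:
--             return 'bitumen_battery'
--         if 'gas' in tags or 'ngl' in tags:
--             return 'gas_battery'
--         return 'oil_battery'
--     if 'plantish' in tags:
--         return 'gas_plant' if 'gas' in tags else 'plant'
--     if 'compressor' in tags:
--         return 'compressor'
--     if 'gathering' in tags:
--         return 'gathering'
--     if 'meterish' in tags:
--         return 'meter'
--     if 'terminalish' in tags: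
--         return 'terminal'
--     if 'storage' in tags:
--         return 'storage'
--     if 'disposalish' in tags:
--         return 'disposal'
--     if 'treat' in tags:
--         return 'treating'
--     return 'other'
--
--
-- def _classify_facility_class(text: str) -> str:
--     t = str(text or '').lower()
--     tags = {tag for kw, tag in _KEYWORD_TAGS if kw in t}
--     if not t:
--         return 'other'
--     return _decide(tags)
-- ===== Notes on version B (the rewrite author's own statement) =====
-- stated objective: alternative
-- what changed: Split classification into two phases: one scan of a flat keyword-to-tag table extracts a set of feature tags from the text, then a separate pure decision function over the tag set (no substring tests) picks the label, dropping A's dead keyword test whose branch returns the same label either way.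
import Mathlib
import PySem

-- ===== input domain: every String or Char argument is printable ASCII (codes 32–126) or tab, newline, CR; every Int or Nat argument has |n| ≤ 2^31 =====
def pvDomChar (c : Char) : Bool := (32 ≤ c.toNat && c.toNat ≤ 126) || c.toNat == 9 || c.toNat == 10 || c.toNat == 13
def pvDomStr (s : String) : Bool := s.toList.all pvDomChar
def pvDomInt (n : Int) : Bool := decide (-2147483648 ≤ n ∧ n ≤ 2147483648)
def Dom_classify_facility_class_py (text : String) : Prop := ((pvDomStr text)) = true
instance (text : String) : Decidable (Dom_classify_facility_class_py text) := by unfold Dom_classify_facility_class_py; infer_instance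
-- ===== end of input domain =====

-- B is a two-phase classifier: one scan of a flat keyword→tag table extracts a set of
-- feature tags, then a pure decision function over the tag set picks the label
-- (objective: alternative decomposition; same behaviour).

-- ===== PORT A =====
def classify_facility_class_py (text : String) : String :=
  let t := PySem.Str.lower (if text == "" then "" else text)
  if t == "" then "other"
  else if PySem.Str.isIn "battery" t then
    if ["bitumen", "sagd", "thermal", "oil sands"].any (fun k => PySem.Str.isIn k t) then "bitumen_battery"
    else if ["gas", "ngl"].any (fun k => PySem.Str.isIn k t) then "gas_battery"
    else if ["oil", "crude"].any (fun k => PySem.Str.isIn k t) then "oil_battery"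
    else "oil_battery"
  else if ["plant", "fractionation", "refinery", "sulphur"].any (fun k => PySem.Str.isIn k t) then
    (if PySem.Str.isIn "gas" t then "gas_plant" else "plant")
  else if PySem.Str.isIn "compressor" t then "compressor"
  else if ["gathering", "meter", "regulator"].any (fun k => PySem.Str.isIn k t) then
    (if PySem.Str.isIn "gathering" t then "gathering" else "meter")
  else if ["terminal", "tank", "storage"].any (fun k => PySem.Str.isIn k t) then
    (if PySem.Str.isIn "terminal" t || PySem.Str.isIn "tank" t then "terminal" else "storage")
  else if ["disposal", "inject", "injection", "waste"].any (fun k => PySem.Str.isIn k t) then "disposal"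
  else if PySem.Str.isIn "treat" t then "treating"
  else "other"

-- ===== PORT B =====
def pvKeywordTags : List (String × String) :=
  [ ("bitumen", "therm"), ("sagd", "therm"), ("thermal", "therm"), ("oil sands", "therm"),
    ("battery", "battery"),
    ("gas", "gas"), ("ngl", "ngl"),
    ("plant", "plantish"), ("fractionation", "plantish"), ("refinery", "plantish"), ("sulphur", "plantish"),
    ("compressor", "compressor"),
    ("gathering", "gathering"), ("meter", "meterish"), ("regulator", "meterish"),
    ("terminal", "terminalish"), ("tank", "terminalish"), ("storage", "storage"),
    ("disposal", "disposalish"), ("inject", "disposalish"), ("injection", "disposalish"), ("waste", "disposalish"),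
    ("treat", "treat") ]

-- phase 2: pure decision over the tag set (no substring tests)
def pvDecide (tags : PySem.Set String) : String :=
  if tags.contains "battery" then
    if tags.contains "therm" then "bitumen_battery"
    else if tags.contains "gas" || tags.contains "ngl" then "gas_battery"
    else "oil_battery"
  else if tags.contains "plantish" then
    (if tags.contains "gas" then "gas_plant" else "plant")
  else if tags.contains "compressor" then "compressor"
  else if tags.contains "gathering" then "gathering"
  else if tags.contains "meterish" then "meter"
  else if tags.contains "terminalish" then "terminal"
  else if tags.contains "storage" then "storage"
  else if tags.contains "disposalish" then "disposal"
  else if tags.contains "treat" then "treating"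
  else "other"

def classify_facility_class_py_alt (text : String) : String :=
  let t := PySem.Str.lower (if text == "" then "" else text)
  -- phase 1: {tag for kw, tag in _KEYWORD_TAGS if kw in t}
  let tags : PySem.Set String :=
    PySem.Set.ofList ((pvKeywordTags.filter (fun p => PySem.Str.isIn p.1 t)).map Prod.snd)
  if t == "" then "other"
  else pvDecide tags

-- ===== PRECONDITION & SPEC =====
def Spec_classify_facility_class_py (text : String) (out : String) : Prop := out = classify_facility_class_py_alt text
instance (text : String) (out : String) : Decidable (Spec_classify_facility_class_py text out) := by unfold Spec_classify_facility_class_py; infer_instance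

-- ===== CLAIM (what is proved, stated in full; the proofs are below) =====
def Claim_equal_classify_facility_class_py : Prop := ∀ (text : String), Dom_classify_facility_class_py text → Spec_classify_facility_class_py text (classify_facility_class_py text)

-- ===== LEMMAS AND PROOFS =====

-- membership in a tag set extracted from a keyword table = a scan of the table
theorem pv_contains_tab (l : List (String × String)) (f : String × String → Bool) (x : String) :
    (PySem.Set.ofList ((l.filter f).map Prod.snd)).contains x = l.any (fun p => f p && (p.2 == x)) := by
  rw [Bool.eq_iff_iff]
  simp [PySem.Set.mem_ofList, List.mem_filter, List.any_eq_true]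

-- A's keyword cascade and B's tag-extraction + decision agree on every (already lowered) text t
set_option maxHeartbeats 2000000 in
theorem pv_core_eq (t : String) :
    (if t == "" then "other"
     else if PySem.Str.isIn "battery" t then
       if ["bitumen", "sagd", "thermal", "oil sands"].any (fun k => PySem.Str.isIn k t) then "bitumen_battery"
       else if ["gas", "ngl"].any (fun k => PySem.Str.isIn k t) then "gas_battery"
       else if ["oil", "crude"].any (fun k => PySem.Str.isIn k t) then "oil_battery"
       else "oil_battery"
     else if ["plant", "fractionation", "refinery", "sulphur"].any (fun k => PySem.Str.isIn k t) then
       (if PySem.Str.isIn "gas" t then "gas_plant" else "plant")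
     else if PySem.Str.isIn "compressor" t then "compressor"
     else if ["gathering", "meter", "regulator"].any (fun k => PySem.Str.isIn k t) then
       (if PySem.Str.isIn "gathering" t then "gathering" else "meter")
     else if ["terminal", "tank", "storage"].any (fun k => PySem.Str.isIn k t) then
       (if PySem.Str.isIn "terminal" t || PySem.Str.isIn "tank" t then "terminal" else "storage")
     else if ["disposal", "inject", "injection", "waste"].any (fun k => PySem.Str.isIn k t) then "disposal"
     else if PySem.Str.isIn "treat" t then "treating"
     else "other")
    = (if t == "" then "other"
       else pvDecide (PySem.Set.ofList
              ((pvKeywordTags.filter (fun p => PySem.Str.isIn p.1 t)).map Prod.snd))) := by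
  unfold pvDecide
  simp only [pv_contains_tab, pvKeywordTags, List.any_cons, List.any_nil]
  simp only [String.reduceBEq, Bool.and_true, Bool.and_false, Bool.or_false, Bool.false_or]
  generalize (t == "") = e0
  generalize (PySem.Str.isIn "bitumen" t || (PySem.Str.isIn "sagd" t || (PySem.Str.isIn "thermal" t || PySem.Str.isIn "oil sands" t))) = gTherm
  generalize PySem.Str.isIn "battery" t = bBat
  generalize PySem.Str.isIn "gas" t = bGas
  generalize PySem.Str.isIn "ngl" t = bNgl
  generalize (PySem.Str.isIn "oil" t || PySem.Str.isIn "crude" t) = gOil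
  generalize (PySem.Str.isIn "plant" t || (PySem.Str.isIn "fractionation" t || (PySem.Str.isIn "refinery" t || PySem.Str.isIn "sulphur" t))) = gPlant
  generalize PySem.Str.isIn "compressor" t = bComp
  generalize (PySem.Str.isIn "meter" t || PySem.Str.isIn "regulator" t) = gMR
  generalize PySem.Str.isIn "gathering" t = bGath
  generalize PySem.Str.isIn "terminal" t = bTerm
  generalize PySem.Str.isIn "tank" t = bTank
  generalize PySem.Str.isIn "storage" t = bStor
  generalize (PySem.Str.isIn "disposal" t || (PySem.Str.isIn "inject" t || (PySem.Str.isIn "injection" t || PySem.Str.isIn "waste" t))) = gDisp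
  generalize PySem.Str.isIn "treat" t = bTreat
  revert e0 gTherm bBat bGas bNgl gOil gPlant bComp gMR bGath bTerm bTank bStor gDisp bTreat
  decide

-- ===== VERDICT (by name: the statement is the Claim_ definition above) =====
theorem classify_facility_class_py_spec : Claim_equal_classify_facility_class_py := by
  intro text _
  unfold Spec_classify_facility_class_py classify_facility_class_py classify_facility_class_py_alt
  exact pv_core_eq _
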